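-- pv_equiv track=rewrite | github.com/ahriley/advent-of-code | 2020/14/code.py | floating
-- ===== SOURCE A (Python) =====
-- def floating(value):
--     if 'X' in value:
--         value_0 = value.copy()
--         value_1 = value.copy()
--
--         value_0[value.index('X')] = '0'
--         value_1[value.index('X')] = '1'
--
--         return floating(value_0) + floating(value_1)
--     return [int(''.join(value), 2)]
-- ===== SOURCE B (Python) =====
-- def floating(value):
--     accs = [0]
--     for v in value:
--         if v == 'X':
--             accs = [b for a in accs for b in (2 * a, 2 * a + 1)]
--         else:
--             for c in v:
--                 accs = [2 * a + int(c, 2) for a in accs]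
--     return accs
-- ===== Notes on version B (the rewrite author's own statement) =====
-- stated objective: alternative
-- what changed: Replaces A's binary head-recursion on the first 'X' token (copying the list twice per X and re-parsing each completed bit string with int(...,2)) by a single left-to-right fold that carries the list of partial integer values, doubling each on every bit character and branching on 'X'.
-- outside the precondition, e.g. on floating(['1_0']): A returns [2], B raises ValueError; on floating(['10 ']): A returns [2], B raises ValueError; on floating(['+1']): A returns [1], B raises ValueError
import Mathlib
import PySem

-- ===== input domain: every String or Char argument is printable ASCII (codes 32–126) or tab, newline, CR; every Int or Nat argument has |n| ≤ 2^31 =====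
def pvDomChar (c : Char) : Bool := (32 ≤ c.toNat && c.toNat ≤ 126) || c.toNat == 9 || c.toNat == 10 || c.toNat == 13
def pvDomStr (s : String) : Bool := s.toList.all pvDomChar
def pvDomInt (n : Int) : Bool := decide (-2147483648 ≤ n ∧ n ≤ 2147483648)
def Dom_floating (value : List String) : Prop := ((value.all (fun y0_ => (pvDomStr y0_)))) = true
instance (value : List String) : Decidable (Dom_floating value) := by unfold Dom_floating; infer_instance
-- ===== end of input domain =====

-- B replaces A's binary head-recursion on the first 'X' token by a single left-to-right fold
-- that carries the list of partial integer values (objective: alternative decomposition).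

-- ===== PORT A =====

-- hand port of int(s, 2): exact for nonempty strings of '0'/'1' characters, which
-- Pre_floating guarantees (sign/whitespace/underscore/prefix cases never occur there)
def pyParseBin (cs : List Char) : Int :=
  cs.foldl (fun a c => 2 * a + (if c = '1' then 1 else 0)) 0

-- termination helper for the port: replacing the first 'X' by '0'/'1' lowers the 'X' count
theorem count_set_first_lt (value : List String) (b : String) (hb : b ≠ "X")
    (h : "X" ∈ value) :
    (value.set ((PySem.List.index? value "X").getD 0) b).count "X" < value.count "X" := by
  have hs : (PySem.List.index? value "X").isSome := by
    simpa [PySem.List.index?_isSome_iff] using h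
  obtain ⟨k, hk⟩ := Option.isSome_iff_exists.mp hs
  obtain ⟨pre, suf, hv, hlen, hnm⟩ := (PySem.List.index?_eq_some_iff value "X" k).mp hk
  subst hv
  rw [hk]
  simp [← hlen, List.count_append, hb]

def floating (value : List String) : List Int :=
  if h : "X" ∈ value then
    let i := (PySem.List.index? value "X").getD 0
    floating (value.set i "0") ++ floating (value.set i "1")
  else [pyParseBin (PySem.Str.join "" value).toList]
termination_by value.count "X"
decreasing_by
  · exact count_set_first_lt value "0" (by decide) h
  · exact count_set_first_lt value "1" (by decide) h

-- ===== PORT B =====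

-- inner 'int(c, 2)' is ported as 'if c = '1' then 1 else 0': exact for '0'/'1' characters,
-- which Pre_floating guarantees (elsewhere Python's int(c, 2) raises ValueError)
def stepBits (accs : List Int) (v : String) : List Int :=
  if v = "X" then accs.flatMap (fun a => [2 * a, 2 * a + 1])
  else v.toList.foldl (fun as c => as.map (fun a => 2 * a + (if c = '1' then 1 else 0))) accs

def floating_alt (value : List String) : List Int :=
  value.foldl stepBits [0]

-- ===== PRECONDITION & SPEC =====
-- Pre_ restricts to the program's domain of bit strings: every token is 'X' or consists of
-- '0'/'1' characters, and not all tokens are empty (on all-empty input A raises ValueError);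
-- tokens relying on int()'s lenient parsing (whitespace, signs, underscores, 0b prefix) are
-- excluded, since there A's value comes from parsing the whole joined string at once.
def Pre_floating (value : List String) : Prop :=
  (∃ s ∈ value, s ≠ "") ∧
    ∀ s ∈ value, s = "X" ∨ s.toList.all (fun c => c == '0' || c == '1') = true
instance (value : List String) : Decidable (Pre_floating value) := by
  unfold Pre_floating; infer_instance

def pvWitness_floating : List String := ["1", "X", "00", "X"]

def Spec_floating (value : List String) (out : List Int) : Prop := out = floating_alt value
instance (value : List String) (out : List Int) : Decidable (Spec_floating value out) := by
  unfold Spec_floating; infer_instance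

-- ===== CLAIM (what is proved, stated in full; the proofs are below) =====
def Claim_equal_floating : Prop :=
  ∀ (value : List String), Dom_floating value → Pre_floating value →
    Spec_floating value (floating value)

-- ===== LEMMAS AND PROOFS =====

-- the inner character fold distributes over an append of accumulator lists
theorem charfold_append (cs : List Char) (as bs : List Int) :
    cs.foldl (fun as c => as.map (fun a => 2 * a + (if c = '1' then 1 else 0))) (as ++ bs)
      = cs.foldl (fun as c => as.map (fun a => 2 * a + (if c = '1' then 1 else 0))) as
        ++ cs.foldl (fun as c => as.map (fun a => 2 * a + (if c = '1' then 1 else 0))) bs := by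
  induction cs generalizing as bs with
  | nil => simp
  | cons c t ih => simp [List.foldl_cons, ih]

-- so the token fold distributes as well
theorem foldl_stepBits_append (l : List String) (as bs : List Int) :
    l.foldl stepBits (as ++ bs) = l.foldl stepBits as ++ l.foldl stepBits bs := by
  induction l generalizing as bs with
  | nil => simp
  | cons v t ih =>
      have hstep : stepBits (as ++ bs) v = stepBits as v ++ stepBits bs v := by
        unfold stepBits; split
        · simp
        · exact charfold_append _ as bs
      simp [List.foldl_cons, hstep, ih]

-- the inner character fold on a singleton accumulator carries the plain numeric fold
theorem charfold_singleton (cs : List Char) (a : Int) :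
    cs.foldl (fun as c => as.map (fun a => 2 * a + (if c = '1' then 1 else 0))) [a]
      = [cs.foldl (fun a c => 2 * a + (if c = '1' then 1 else 0)) a] := by
  induction cs generalizing a with
  | nil => simp
  | cons c t ih => simp [List.foldl_cons, ih]

-- with no 'X' the accumulator stays a singleton carrying the numeric fold over all characters
theorem foldl_stepBits_noX (l : List String) (a : Int) (h : "X" ∉ l) :
    l.foldl stepBits [a] =
      [l.foldl (fun a v => v.toList.foldl (fun a c => 2 * a + (if c = '1' then 1 else 0)) a) a] := by
  induction l generalizing a with
  | nil => simp
  | cons v t ih =>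
      have hv : v ≠ "X" := fun hv => h (hv ▸ List.mem_cons_self)
      have ht : "X" ∉ t := fun ht => h (List.mem_cons_of_mem _ ht)
      simp only [List.foldl_cons, stepBits, hv, ite_false, charfold_singleton]
      exact ih _ ht

-- joining with the empty separator is flattening
theorem chars_join_nil_flatten (L : List (List Char)) :
    PySem.Chars.join [] L = L.flatten := by
  induction L with
  | nil => simp [PySem.Chars.join_nil]
  | cons p rest ih =>
      cases rest with
      | nil => simp [PySem.Chars.join_singleton]
      | cons q r =>
          rw [PySem.Chars.join_cons_cons]
          simp [ih]

-- parsing the joined string = the numeric fold over the tokens' characters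
theorem parse_join (l : List String) :
    pyParseBin (PySem.Str.join "" l).toList =
      l.foldl (fun a v => v.toList.foldl (fun a c => 2 * a + (if c = '1' then 1 else 0)) a) 0 := by
  have hsep : ("" : String).toList = [] := rfl
  rw [PySem.Str.toList_join, hsep, chars_join_nil_flatten]
  unfold pyParseBin
  rw [List.foldl_flatten, List.foldl_map]

-- Pre_'s token condition is preserved by replacing one token with a bit
theorem pre_set_bit (value : List String) (i : Nat) (b : String)
    (hb : b = "0" ∨ b = "1")
    (h : ∀ s ∈ value, s = "X" ∨ s.toList.all (fun c => c == '0' || c == '1') = true) :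
    ∀ s ∈ value.set i b, s = "X" ∨ s.toList.all (fun c => c == '0' || c == '1') = true := by
  intro s hs
  rcases List.mem_or_eq_of_mem_set hs with hs | hs
  · exact h s hs
  · subst hs
    rcases hb with hb | hb <;> subst hb <;> decide

-- main equivalence, by induction on the number of 'X' tokens
theorem floating_eq_alt (n : Nat) (value : List String)
    (hc : value.count "X" = n) (h : Pre_floating value) :
    floating value = floating_alt value := by
  induction n generalizing value with
  | zero =>
      have hnm : "X" ∉ value := by
        intro hm
        have := List.count_pos_iff.mpr hm
        omega
      rw [floating]
      simp only [hnm, dite_false]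
      unfold floating_alt
      rw [foldl_stepBits_noX value 0 hnm, parse_join value]
  | succ m ih =>
      have hm : "X" ∈ value := by
        by_contra hnm
        rw [List.count_eq_zero_of_not_mem hnm] at hc
        omega
      have hs : (PySem.List.index? value "X").isSome := by
        simpa [PySem.List.index?_isSome_iff] using hm
      obtain ⟨k, hk⟩ := Option.isSome_iff_exists.mp hs
      obtain ⟨pre, suf, hv, hlen, hnmp⟩ := (PySem.List.index?_eq_some_iff value "X" k).mp hk
      have hset : ∀ b : String, value.set ((PySem.List.index? value "X").getD 0) b
          = pre ++ b :: suf := by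
        intro b
        rw [hk]
        simp [hv, ← hlen]
      have hcb : ∀ b : String, b ≠ "X" → (pre ++ b :: suf).count "X" = m := by
        intro b hb
        have : value.count "X" = pre.count "X" + (suf.count "X" + 1) := by
          simp [hv, List.count_append]
        have hbx : (b == "X") = false := by simpa using hb
        simp [List.count_append, List.count_cons, hbx]
        omega
      have hP : ∀ b : String, b = "0" ∨ b = "1" →
          floating (pre ++ b :: suf) = floating_alt (pre ++ b :: suf) := by
        intro b hb
        refine ih (pre ++ b :: suf) (hcb b ?_) ⟨⟨b, by simp, ?_⟩, ?_⟩
        · rcases hb with hb | hb <;> subst hb <;> decide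
        · rcases hb with hb | hb <;> subst hb <;> decide
        · have := pre_set_bit value ((PySem.List.index? value "X").getD 0) b hb h.2
          rwa [hset b] at this
      rw [floating]
      simp only [hm, dite_true, hset]
      rw [hP "0" (Or.inl rfl), hP "1" (Or.inr rfl)]
      unfold floating_alt
      have hnoXpre := foldl_stepBits_noX pre 0 hnmp
      set p : Int := pre.foldl
        (fun a v => v.toList.foldl (fun a c => 2 * a + (if c = '1' then 1 else 0)) a) 0 with hp
      have hsplit : ∀ x : String, (pre ++ x :: suf).foldl stepBits [0]
          = suf.foldl stepBits (stepBits [p] x) := by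
        intro x
        rw [List.foldl_append, hnoXpre, List.foldl_cons]
      rw [hv, hsplit "X", hsplit "0", hsplit "1"]
      have h0 : stepBits [p] "0" = [2 * p] := by simp [stepBits]
      have h1 : stepBits [p] "1" = [2 * p + 1] := by simp [stepBits]
      have hX : stepBits [p] "X" = [2 * p] ++ [2 * p + 1] := by simp [stepBits]
      rw [h0, h1, hX, foldl_stepBits_append]

-- ===== VERDICT (by name: the statement is the Claim_ definition above) =====
theorem floating_spec : Claim_equal_floating := by
  intro value _ hpre
  unfold Spec_floating
  exact floating_eq_alt (value.count "X") value rfl hpre
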